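-- pv_equiv track=rewrite | github.com/DigitalBard/Algorithms | implementation/paint_over.py | solution
-- ===== SOURCE A (Python) =====
-- def solution(n, m, section):
--     answer = 0
--     while section:
--         answer += 1
--         sec = section.pop(0)
--         while section:
--             next = section.pop(0)
--             if next >= sec + m:
--                 section.insert(0, next)
--                 break
--
--     return answer
-- ===== SOURCE B (Python) =====
-- def solution(n, m, section):
--     answer = 0
--     boundary = None
--     while section:
--         s = section.pop(0)
--         if boundary is None or s >= boundary:
--             answer += 1
--             boundary = s + m
--     return answer
-- ===== Notes on version B (the rewrite author's own statement) =====
-- stated objective: simpler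
-- what changed: Replaces A's nested outer-pass/inner-consume while loops with one flat pass that maintains a running boundary threshold (s + m of the last counted section); both empty `section` in place.
import Mathlib
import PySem

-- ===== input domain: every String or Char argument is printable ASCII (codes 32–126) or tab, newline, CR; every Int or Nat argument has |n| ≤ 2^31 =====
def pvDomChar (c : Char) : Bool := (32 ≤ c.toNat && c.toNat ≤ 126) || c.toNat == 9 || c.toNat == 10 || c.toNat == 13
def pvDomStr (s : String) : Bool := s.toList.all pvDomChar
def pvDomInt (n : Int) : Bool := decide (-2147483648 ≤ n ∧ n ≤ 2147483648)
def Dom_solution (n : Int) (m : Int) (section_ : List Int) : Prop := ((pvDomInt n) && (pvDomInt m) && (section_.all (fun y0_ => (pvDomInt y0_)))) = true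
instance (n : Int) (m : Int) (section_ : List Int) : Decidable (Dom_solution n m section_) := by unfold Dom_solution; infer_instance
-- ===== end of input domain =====

-- B: one flat pass with a running boundary instead of A's nested peel loops; both empty `section` in place (equivalence is about the return value).
-- ===== PORT A =====
-- inner `while`: pop elements until one with next >= sec + m, which is reinserted
def consumeA (b : Int) : List Int → List Int
  | [] => []
  | x :: xs => if x ≥ b then x :: xs else consumeA b xs

theorem consumeA_length_le (b : Int) : ∀ l : List Int, (consumeA b l).length ≤ l.length
  | [] => le_refl _
  | x :: xs => by
    simp only [consumeA]
    split
    · simp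
    · exact le_trans (consumeA_length_le b xs) (Nat.le_succ _)

-- outer `while`: count a pass, consume the run starting at sec
def loopA (m : Int) : List Int → Int
  | [] => 0
  | sec :: rest => 1 + loopA m (consumeA (sec + m) rest)
termination_by l => l.length
decreasing_by exact Nat.lt_succ_of_le (consumeA_length_le _ _)

def solution (n : Int) (m : Int) (section_ : List Int) : Int := loopA m section_

-- ===== PORT B =====
-- single pass: state = (answer, boundary); count s iff boundary is None or s >= boundary
def stepB (m : Int) (st : Int × Option Int) (s : Int) : Int × Option Int :=
  match st.2 with
  | none => (st.1 + 1, some (s + m))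
  | some b => if s ≥ b then (st.1 + 1, some (s + m)) else st

def solution_alt (n : Int) (m : Int) (section_ : List Int) : Int :=
  (section_.foldl (stepB m) (0, none)).1

-- ===== PRECONDITION & SPEC =====
def Spec_solution (n : Int) (m : Int) (section_ : List Int) (out : Int) : Prop := out = solution_alt n m section_
instance (n : Int) (m : Int) (section_ : List Int) (out : Int) : Decidable (Spec_solution n m section_ out) := by unfold Spec_solution; infer_instance

-- ===== CLAIM (what is proved, stated in full; the proofs are below) =====
def Claim_equal_solution : Prop := ∀ (n : Int) (m : Int) (section_ : List Int), Dom_solution n m section_ → Spec_solution n m section_ (solution n m section_)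

-- ===== LEMMAS AND PROOFS =====

-- ===== VERDICT (by name: the statement is the Claim_ definition above) =====
theorem foldl_stepB_some (m : Int) : ∀ (l : List Int) (acc b : Int),
    (l.foldl (stepB m) (acc, some b)).1 = acc + loopA m (consumeA b l)
  | [], acc, b => by simp [consumeA, loopA]
  | x :: xs, acc, b => by
    simp only [List.foldl_cons, stepB, consumeA]
    split
    · rw [foldl_stepB_some m xs (acc + 1) (x + m), loopA]
      ring
    · exact foldl_stepB_some m xs acc b

theorem solution_spec : Claim_equal_solution := by
  intro n m section_ _
  unfold Spec_solution solution solution_alt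
  cases section_ with
  | nil => simp [loopA]
  | cons sec rest =>
    simp only [List.foldl_cons, stepB, loopA]
    rw [foldl_stepB_some m rest (0 + 1) (sec + m)]
    ring
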